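-- pv_equiv track=rewrite | github.com/huizbaka/ege | howeworks/13092024/24.py | find_longest_valid_sequence
-- ===== SOURCE A (Python) =====
-- def find_longest_valid_sequence(text):
--     allowed_characters = set("0123456789ABCDEFGHIJKLMNOPQRSTUVWX")
--     longest_length = 0
--     i = 0
--     text_length = len(text)
--
--     while i < text_length:
--         j = i
--         while j < text_length and text[j] in allowed_characters:
--             j += 1
--         if i < j and (text[i] != '0' or i == j - 1):
--             longest_length = max(longest_length, j - i)
--         i = j + 1
--
--     return longest_length
-- ===== SOURCE B (Python) =====
-- def find_longest_valid_sequence(text):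
--     allowed = set("0123456789ABCDEFGHIJKLMNOPQRSTUVWX")
--     cleaned = ''.join(ch if ch in allowed else ' ' for ch in text)
--     runs = cleaned.split()
--     candidates = [len(r) for r in runs if r[0] != '0' or len(r) == 1]
--     return max(candidates, default=0)
-- ===== Notes on version B (the rewrite author's own statement) =====
-- stated objective: idiomatic
-- what changed: Replaced A's interleaved nested while-loop index scan by three staged passes: map every disallowed character to a space, tokenise with str.split(), then filter the token list and reduce with max(..., default=0).
import Mathlib
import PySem

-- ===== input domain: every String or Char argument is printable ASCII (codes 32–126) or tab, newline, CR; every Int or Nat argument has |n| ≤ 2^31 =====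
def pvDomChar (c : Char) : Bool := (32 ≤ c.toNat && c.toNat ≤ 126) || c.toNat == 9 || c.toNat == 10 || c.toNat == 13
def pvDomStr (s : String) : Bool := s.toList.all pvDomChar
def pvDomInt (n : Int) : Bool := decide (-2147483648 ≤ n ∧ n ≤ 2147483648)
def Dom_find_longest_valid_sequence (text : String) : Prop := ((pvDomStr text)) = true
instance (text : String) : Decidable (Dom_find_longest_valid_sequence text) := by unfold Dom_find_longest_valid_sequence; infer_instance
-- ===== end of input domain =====

-- B replaces A's interleaved nested while-loop scan by three staged passes: map the text to a
-- string where every disallowed character becomes a space, tokenise it with str.split(), then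
-- filter/reduce the token list with max(..., default=0); objective: idiomatic.

-- shared character class "0123456789ABCDEFGHIJKLMNOPQRSTUVWX"
def pvAllowed (c : Char) : Bool := "0123456789ABCDEFGHIJKLMNOPQRSTUVWX".toList.contains c

-- ===== PORT A =====
-- inner while loop: length of the allowed run starting here (j - i)
def pvRunLen : List Char → Nat
  | [] => 0
  | c :: rest => if pvAllowed c then pvRunLen rest + 1 else 0

-- outer while loop over i, expressed on the remaining suffix of the text
def pvOuterA : List Char → Int → Int
  | [], longest => longest
  | c :: rest, longest =>
      let j := pvRunLen (c :: rest)
      let longest' := if 0 < j ∧ (c ≠ '0' ∨ j = 1) then max longest (j : Int) else longest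
      pvOuterA ((c :: rest).drop (j + 1)) longest'
  termination_by cs _ => cs.length
  decreasing_by simp [List.length_drop]

def find_longest_valid_sequence (text : String) : Int := pvOuterA text.toList 0

-- ===== PORT B =====
-- 'ch if ch in allowed else ' '' of Source B's join-comprehension
def pvClean (ch : Char) : Char := if pvAllowed ch then ch else ' '

-- the comprehension filter 'r[0] != '0' or len(r) == 1'
def pvKeep (r : List Char) : Bool := decide (PySem.List.pyGetD r 0 ' ' ≠ '0') || (r.length == 1)

def find_longest_valid_sequence_alt (text : String) : Int :=
  let cleaned := text.toList.map pvClean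
  let runs := PySem.Chars.split₀ cleaned
  let candidates := (runs.filter pvKeep).map (fun r => (r.length : Int))
  PySem.List.maxD candidates (fun x => x) 0

-- ===== PRECONDITION & SPEC =====
def Spec_find_longest_valid_sequence (text : String) (out : Int) : Prop := out = find_longest_valid_sequence_alt text
instance (text : String) (out : Int) : Decidable (Spec_find_longest_valid_sequence text out) := by unfold Spec_find_longest_valid_sequence; infer_instance

-- ===== CLAIM (what is proved, stated in full; the proofs are below) =====
def Claim_equal_find_longest_valid_sequence : Prop := ∀ (text : String), Dom_find_longest_valid_sequence text → Spec_find_longest_valid_sequence text (find_longest_valid_sequence text)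

-- ===== LEMMAS AND PROOFS =====

-- B's value restated as an Int fold over the candidate lengths (proof-side shorthand)
def pvF (cs : List Char) : Int :=
  (((PySem.Chars.split₀ (cs.map pvClean)).filter pvKeep).map (fun r => (r.length : Int))).foldl max 0

lemma pvAllowed_nonspace {c : Char} (h : pvAllowed c = true) : PySem.Chars.isspace c = false := by
  simp [pvAllowed] at h
  rcases h with rfl|rfl|rfl|rfl|rfl|rfl|rfl|rfl|rfl|rfl|rfl|rfl|rfl|rfl|rfl|rfl|rfl|rfl|rfl|rfl|rfl|rfl|rfl|rfl|rfl|rfl|rfl|rfl|rfl|rfl|rfl|rfl|rfl|rfl <;> decide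

lemma pvGo_cons (c : Char) (rest : List Char) (cur : List Char) (acc : List (List Char)) :
    PySem.Chars.split₀.go (c :: rest) cur acc =
      if PySem.Chars.isspace c then
        (if cur.isEmpty then PySem.Chars.split₀.go rest [] acc
         else PySem.Chars.split₀.go rest [] (cur.reverse :: acc))
      else PySem.Chars.split₀.go rest (c :: cur) acc := by
  simp [PySem.Chars.split₀.go]

lemma pvGo_nil (cur : List Char) (acc : List (List Char)) :
    PySem.Chars.split₀.go [] cur acc =
      if cur.isEmpty then acc.reverse else (cur.reverse :: acc).reverse := by
  simp [PySem.Chars.split₀.go]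

-- the accumulator is a prefix already produced
lemma pvGo_acc (cs : List Char) : ∀ (cur : List Char) (acc : List (List Char)),
    PySem.Chars.split₀.go cs cur acc = acc.reverse ++ PySem.Chars.split₀.go cs cur [] := by
  induction cs with
  | nil =>
      intro cur acc
      by_cases h : cur.isEmpty <;> simp [pvGo_nil, h]
  | cons c rest ih =>
      intro cur acc
      by_cases hs : PySem.Chars.isspace c
      · by_cases hc : cur.isEmpty
        · rw [pvGo_cons, if_pos hs, if_pos hc, pvGo_cons, if_pos hs, if_pos hc, ih [] acc]
        · rw [pvGo_cons, if_pos hs, if_neg hc, ih [] (cur.reverse :: acc),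
              pvGo_cons, if_pos hs, if_neg hc, ih [] [cur.reverse]]
          simp
      · rw [pvGo_cons, if_neg hs, ih (c :: cur) acc, pvGo_cons, if_neg hs]

-- a block of non-space characters is swallowed into cur
lemma pvGo_word (t : List Char) (h : ∀ x ∈ t, PySem.Chars.isspace x = false) :
    ∀ (rest cur : List Char) (acc : List (List Char)),
    PySem.Chars.split₀.go (t ++ rest) cur acc = PySem.Chars.split₀.go rest (t.reverse ++ cur) acc := by
  induction t with
  | nil => intro rest cur acc; simp
  | cons c t' ih =>
      intro rest cur acc
      have hc : PySem.Chars.isspace c = false := h c (by simp)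
      rw [List.cons_append, pvGo_cons, if_neg (by simp [hc]),
          ih (fun x hx => h x (by simp [hx])) rest (c :: cur) acc]
      simp

-- max(xs, default=0) over nonnegative ints is the plain max-fold
lemma pvMaxAux : ∀ (l : List Int) (m : Int), PySem.List.max? (m :: l) (fun x => x) = some (l.foldl max m) := by
  intro l
  induction l with
  | nil => intro m; simp [PySem.List.max?]
  | cons a l' ih =>
      intro m
      have h2 : PySem.List.max? (m :: a :: l') (fun x => x) = PySem.List.max? (max m a :: l') (fun x => x) := by
        simp only [PySem.List.max?, List.foldl_cons]
        congr 1
        split_ifs with h <;> simp [max_def] <;> omega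
      rw [h2, ih (max m a)]
      simp

lemma pvMaxD_eq_foldl (l : List Int) (h : ∀ x ∈ l, 0 ≤ x) :
    PySem.List.maxD l (fun x => x) 0 = l.foldl max 0 := by
  cases l with
  | nil => simp [PySem.List.maxD, PySem.List.max?]
  | cons a l' =>
      have ha : 0 ≤ a := h a (by simp)
      rw [PySem.List.maxD, pvMaxAux l' a]
      simp [max_eq_right ha]

lemma pvFoldMax_shift (l : List Int) : ∀ (b : Int), 0 ≤ b →
    l.foldl max b = max b (l.foldl max 0) := by
  induction l with
  | nil => intro b hb; simp [max_eq_left hb]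
  | cons a l' ih =>
      intro b hb
      rw [List.foldl_cons, List.foldl_cons, ih (max b a) (le_trans hb (le_max_left _ _)),
          ih (max 0 a) (le_max_left _ _)]
      rcases le_total b a with h1 | h1 <;> rcases le_total (0:Int) a with h2 | h2 <;>
        simp [max_def] <;> omega

lemma pvF_nonneg (cs : List Char) : 0 ≤ pvF cs :=
  (PySem.List.le_foldl_max _ 0).1

lemma pvRunLen_eq_takeWhile (cs : List Char) : pvRunLen cs = (cs.takeWhile pvAllowed).length := by
  induction cs with
  | nil => simp [pvRunLen]
  | cons c rest ih =>
      by_cases h : pvAllowed c <;> simp [pvRunLen, h, ih]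

lemma pvDropWhile_head_not (l : List Char) (d0 : Char) (d' : List Char)
    (h : l.dropWhile pvAllowed = d0 :: d') : pvAllowed d0 = false := by
  induction l with
  | nil => simp at h
  | cons c rest ih =>
      by_cases hc : pvAllowed c
      · exact ih (by simpa [hc] using h)
      · simp [hc] at h
        simpa [← h.1] using hc

lemma pvClean_id (t : List Char) (h : ∀ x ∈ t, pvAllowed x = true) : t.map pvClean = t := by
  induction t with
  | nil => rfl
  | cons c t' ih =>
      simp [pvClean, h c (by simp), ih (fun x hx => h x (by simp [hx]))]

lemma pvMain : ∀ (n : Nat) (cs : List Char), cs.length ≤ n → ∀ (best : Int), 0 ≤ best →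
    pvOuterA cs best = max best (pvF cs) := by
  intro n
  induction n with
  | zero =>
      intro cs hcs best hb
      have : cs = [] := List.eq_nil_of_length_eq_zero (Nat.le_zero.mp hcs)
      subst this
      rw [pvOuterA]
      simp [pvF, PySem.Chars.split₀, pvGo_nil, max_eq_left hb]
  | succ n ih =>
      intro cs hcs best hb
      match cs with
      | [] =>
          rw [pvOuterA]
          simp [pvF, PySem.Chars.split₀, pvGo_nil, max_eq_left hb]
      | c :: rest =>
        rw [pvOuterA]
        by_cases hc : pvAllowed c
        · -- a run starts at c
          obtain ⟨t, ht⟩ : ∃ t, List.takeWhile pvAllowed rest = t := ⟨_, rfl⟩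
          obtain ⟨d, hd⟩ : ∃ d, List.dropWhile pvAllowed rest = d := ⟨_, rfl⟩
          have hsplit : rest = t ++ d := by rw [← ht, ← hd, List.takeWhile_append_dropWhile]
          subst hsplit
          have hall : ∀ x ∈ t, pvAllowed x = true := fun x hx =>
            List.mem_takeWhile_imp (ht ▸ hx)
          have hj : pvRunLen (c :: (t ++ d)) = t.length + 1 := by
            simp [pvRunLen, hc, pvRunLen_eq_takeWhile, ht]
          have hword : ∀ x ∈ c :: t, PySem.Chars.isspace x = false := by
            intro x hx
            rcases hx with _ | hx
            · exact pvAllowed_nonspace hc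
            · exact pvAllowed_nonspace (hall x (by assumption))
          have hcleanword : (c :: (t ++ d)).map pvClean = (c :: t) ++ d.map pvClean := by
            simp [pvClean, hc, pvClean_id t hall]
          -- the tokenizer swallows the whole run first
          have hruns : PySem.Chars.split₀ ((c :: (t ++ d)).map pvClean)
              = PySem.Chars.split₀.go (d.map pvClean) ((c :: t).reverse) [] := by
            rw [PySem.Chars.split₀, hcleanword, pvGo_word (c :: t) hword]
            simp
          simp only [hj]
          cases d with
          | nil =>
            have hdrop : (c :: (t ++ ([] : List Char))).drop (t.length + 1 + 1) = [] := by
              apply List.drop_eq_nil_of_le; simp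
            have hf : pvF (c :: (t ++ [])) =
                ((if pvKeep (c :: t) then [((c :: t).length : Int)] else []).foldl max 0) := by
              rw [pvF, hruns]
              simp only [List.map_nil, pvGo_nil]
              by_cases hk : pvKeep (c :: t) <;> simp [hk]
            rw [hdrop, hf]
            simp only [pvOuterA]
            by_cases hz : c = '0'
            · by_cases h1 : t = []
              · subst h1 hz
                have hk : pvKeep ['0'] = true := by decide
                rw [if_pos (by constructor; omega; exact Or.inr rfl), hk]
                simp
              · have hk : pvKeep (c :: t) = false := by
                  subst hz
                  simp [pvKeep, h1]
                have hlt : t.length ≠ 0 := by simpa using h1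
                rw [if_neg (by rintro ⟨-, h | h⟩; exacts [absurd hz h, absurd h (by omega)]), hk]
                simp [max_eq_left hb]
            · have hk : pvKeep (c :: t) = true := by simp [pvKeep, hz]
              rw [if_pos ⟨by omega, Or.inl hz⟩, hk]
              simp [max_eq_right (show (0 : Int) ≤ (t.length : Int) + 1 by positivity)]
          | cons d0 d' =>
            have hd0 : pvAllowed d0 = false := pvDropWhile_head_not (t ++ d0 :: d') d0 d' hd
            have hlen' : d'.length ≤ n := by simp at hcs; omega
            have hdrop : (c :: (t ++ d0 :: d')).drop (t.length + 1 + 1) = d' := by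
              rw [show c :: (t ++ d0 :: d') = (c :: t ++ [d0]) ++ d' from by simp]
              rw [List.drop_left' (by simp)]
            have hruns2 : PySem.Chars.split₀ ((c :: (t ++ d0 :: d')).map pvClean)
                = (c :: t) :: PySem.Chars.split₀ (d'.map pvClean) := by
              rw [hruns]
              have h0 : (d0 :: d').map pvClean = ' ' :: d'.map pvClean := by
                simp [pvClean, hd0]
              rw [h0, pvGo_cons, if_pos (by decide), if_neg (by simp)]
              simp only [List.reverse_reverse]
              rw [pvGo_acc (d'.map pvClean) [] [c :: t]]
              simp [PySem.Chars.split₀]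
            have hf : pvF (c :: (t ++ d0 :: d')) =
                ((if pvKeep (c :: t) then [((c :: t).length : Int)] else []) ++
                  ((PySem.Chars.split₀ (d'.map pvClean)).filter pvKeep).map
                    (fun r => (r.length : Int))).foldl max 0 := by
              rw [pvF, hruns2]
              by_cases hk : pvKeep (c :: t) <;> simp [hk]
            have hfd' : (((PySem.Chars.split₀ (d'.map pvClean)).filter pvKeep).map
                (fun r => (r.length : Int))).foldl max 0 = pvF d' := rfl
            rw [hdrop, hf]
            by_cases hz : c = '0'
            · by_cases h1 : t = []
              · -- kept on both sides (single '0')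
                subst h1
                have hk : pvKeep (c :: []) = true := by subst hz; decide
                rw [if_pos (by constructor; omega; exact Or.inr (by simp)), hk]
                simp only [if_true, List.singleton_append, List.foldl_cons]
                rw [pvFoldMax_shift _ _ (le_max_left _ _), hfd',
                    ih d' hlen' _ (le_trans hb (le_max_left _ _)),
                    max_eq_right (show (0 : Int) ≤ ((c :: ([] : List Char)).length : Int) by positivity),
                    max_assoc]
                norm_num
              · -- dropped on both sides ('0'-led run of length ≥ 2)
                have hk : pvKeep (c :: t) = false := by subst hz; simp [pvKeep, h1]
                have hlt : t.length ≠ 0 := by simpa using h1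
                rw [if_neg (by rintro ⟨-, h | h⟩; exacts [absurd hz h, absurd h (by omega)]), hk]
                simp only [Bool.false_eq_true, if_false, List.nil_append]
                rw [hfd', ih d' hlen' best hb]
            · -- kept on both sides (run not starting with '0')
              have hk : pvKeep (c :: t) = true := by simp [pvKeep, hz]
              rw [if_pos ⟨by omega, Or.inl hz⟩, hk]
              simp only [if_true, List.singleton_append, List.foldl_cons]
              rw [pvFoldMax_shift _ _ (le_max_left _ _), hfd',
                  ih d' hlen' _ (le_trans hb (le_max_left _ _)),
                  max_eq_right (show (0 : Int) ≤ ((c :: t).length : Int) by positivity),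
                  max_assoc]
              norm_num
        · -- c is not allowed: both sides skip it
          have hj : pvRunLen (c :: rest) = 0 := by simp [pvRunLen, hc]
          have hfs : pvF (c :: rest) = pvF rest := by
            have h0 : (c :: rest).map pvClean = ' ' :: rest.map pvClean := by simp [pvClean, hc]
            rw [pvF, h0, PySem.Chars.split₀, pvGo_cons, if_pos (by decide), if_pos (by simp)]
            rfl
          simp only [hj]
          rw [if_neg (by omega), show (c :: rest).drop (0 + 1) = rest from by simp,
              ih rest (by simpa using Nat.le_of_succ_le_succ hcs) best hb, hfs]

-- ===== VERDICT (by name: the statement is the Claim_ definition above) =====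
theorem find_longest_valid_sequence_spec : Claim_equal_find_longest_valid_sequence := by
  intro text _
  unfold Spec_find_longest_valid_sequence find_longest_valid_sequence find_longest_valid_sequence_alt
  rw [pvMain text.toList.length text.toList le_rfl 0 le_rfl,
      max_eq_right (pvF_nonneg text.toList),
      pvMaxD_eq_foldl _ (by rintro x hx; simp at hx; obtain ⟨r, -, rfl⟩ := hx; positivity)]
  rfl
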